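-- pv_equiv track=rewrite | github.com/eugendimant/software-spanish-learning | pages/conversation.py | generate_landlord_response
-- ===== SOURCE A (Python) =====
-- def generate_landlord_response(user_message: str, turn: int, context: list, templates: dict) -> str:
--     """Generate response for landlord/rental negotiation scenarios."""
--     user_lower = user_message.lower()
--
--     if turn == 0:
--         if any(word in user_lower for word in ["alquiler", "piso", "apartamento", "vivienda"]):
--             return "Si, sigue disponible. Busca para entrar ya o mas adelante?"
--         else:
--             return "Si, digame. Que necesita saber sobre el inmueble?"
--
--     elif turn == 1:
--         if any(word in user_lower for word in ["precio", "euros", "mensual", "cuesta"]):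
--             return "El precio es de 850 euros al mes, mas gastos de comunidad que son unos 50."
--         elif any(word in user_lower for word in ["cuando", "fecha", "entrar", "disponible"]):
--             return "Podria entrar a partir del dia 1 del mes que viene. Le interesa verlo?"
--         else:
--             return "Tiene dos habitaciones, salon, cocina equipada y un bano completo."
--
--     elif turn == 2:
--         if any(word in user_lower for word in ["negociar", "bajar", "descuento", "menos"]):
--             return "Mire, el precio ya es ajustado para la zona. Aunque para un inquilino estable podria considerar algo."
--         elif any(word in user_lower for word in ["fianza", "deposito", "garantia"]):
--             return "La fianza son dos meses. Es lo habitual por la ley."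
--         else:
--             return "Si quiere, podemos quedar para que lo vea. Le va bien manana por la tarde?"
--
--     elif turn == 3:
--         if any(word in user_lower for word in ["contrato", "duracion", "ano", "renovar"]):
--             return "El contrato es por un ano, renovable. Si se queda mas tiempo, mantenemos las condiciones."
--         elif any(word in user_lower for word in ["perfecto", "me interesa", "quedamos", "bien"]):
--             return "Estupendo. Le espero manana a las 6 entonces. Traiga el DNI por si acaso."
--         else:
--             return "Podria dejarlo en 825 si firma por dos anos. Que le parece?"
--
--     else:
--         return "Muy bien, pues quedamos asi. Le mando la direccion exacta por mensaje. Hasta manana."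
-- ===== SOURCE B (Python) =====
-- # One flat decision list: each row is (turn-guard, keyword-guard, response); None = wildcard.
-- # A competent rule-engine style rewrite: the nested if/elif ladder and the any() keyword
-- # groups disappear into a single linear scan over per-keyword rows; first matching row wins.
-- # Correct because within each original keyword group every keyword produced the same response,
-- # so flattening a group into consecutive rows preserves first-match semantics.
-- _RULES = [
--     (0, "alquiler",    "Si, sigue disponible. Busca para entrar ya o mas adelante?"),
--     (0, "piso",        "Si, sigue disponible. Busca para entrar ya o mas adelante?"),
--     (0, "apartamento", "Si, sigue disponible. Busca para entrar ya o mas adelante?"),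
--     (0, "vivienda",    "Si, sigue disponible. Busca para entrar ya o mas adelante?"),
--     (0, None,          "Si, digame. Que necesita saber sobre el inmueble?"),
--     (1, "precio",      "El precio es de 850 euros al mes, mas gastos de comunidad que son unos 50."),
--     (1, "euros",       "El precio es de 850 euros al mes, mas gastos de comunidad que son unos 50."),
--     (1, "mensual",     "El precio es de 850 euros al mes, mas gastos de comunidad que son unos 50."),
--     (1, "cuesta",      "El precio es de 850 euros al mes, mas gastos de comunidad que son unos 50."),
--     (1, "cuando",      "Podria entrar a partir del dia 1 del mes que viene. Le interesa verlo?"),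
--     (1, "fecha",       "Podria entrar a partir del dia 1 del mes que viene. Le interesa verlo?"),
--     (1, "entrar",      "Podria entrar a partir del dia 1 del mes que viene. Le interesa verlo?"),
--     (1, "disponible",  "Podria entrar a partir del dia 1 del mes que viene. Le interesa verlo?"),
--     (1, None,          "Tiene dos habitaciones, salon, cocina equipada y un bano completo."),
--     (2, "negociar",    "Mire, el precio ya es ajustado para la zona. Aunque para un inquilino estable podria considerar algo."),
--     (2, "bajar",       "Mire, el precio ya es ajustado para la zona. Aunque para un inquilino estable podria considerar algo."),
--     (2, "descuento",   "Mire, el precio ya es ajustado para la zona. Aunque para un inquilino estable podria considerar algo."),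
--     (2, "menos",       "Mire, el precio ya es ajustado para la zona. Aunque para un inquilino estable podria considerar algo."),
--     (2, "fianza",      "La fianza son dos meses. Es lo habitual por la ley."),
--     (2, "deposito",    "La fianza son dos meses. Es lo habitual por la ley."),
--     (2, "garantia",    "La fianza son dos meses. Es lo habitual por la ley."),
--     (2, None,          "Si quiere, podemos quedar para que lo vea. Le va bien manana por la tarde?"),
--     (3, "contrato",    "El contrato es por un ano, renovable. Si se queda mas tiempo, mantenemos las condiciones."),
--     (3, "duracion",    "El contrato es por un ano, renovable. Si se queda mas tiempo, mantenemos las condiciones."),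
--     (3, "ano",         "El contrato es por un ano, renovable. Si se queda mas tiempo, mantenemos las condiciones."),
--     (3, "renovar",     "El contrato es por un ano, renovable. Si se queda mas tiempo, mantenemos las condiciones."),
--     (3, "perfecto",    "Estupendo. Le espero manana a las 6 entonces. Traiga el DNI por si acaso."),
--     (3, "me interesa", "Estupendo. Le espero manana a las 6 entonces. Traiga el DNI por si acaso."),
--     (3, "quedamos",    "Estupendo. Le espero manana a las 6 entonces. Traiga el DNI por si acaso."),
--     (3, "bien",        "Estupendo. Le espero manana a las 6 entonces. Traiga el DNI por si acaso."),
--     (3, None,          "Podria dejarlo en 825 si firma por dos anos. Que le parece?"),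
--     (None, None,       "Muy bien, pues quedamos asi. Le mando la direccion exacta por mensaje. Hasta manana."),
-- ]
--
--
-- def generate_landlord_response(user_message: str, turn: int, context: list, templates: dict) -> str:
--     """Generate response for landlord/rental negotiation scenarios."""
--     user_lower = user_message.lower()
--     for t, kw, resp in _RULES:
--         if (t is None or t == turn) and (kw is None or kw in user_lower):
--             return resp
-- ===== Notes on version B (the rewrite author's own statement) =====
-- stated objective: alternative
-- what changed: Replaced A's nested per-turn if/elif ladder with any()-keyword-group checks by a single flat decision list of (turn-guard, keyword-guard, response) rows with wildcard guards, scanned once with first-match-wins; the any() groups and the turn dispatch disappear into one generic rule loop.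
import Mathlib
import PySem

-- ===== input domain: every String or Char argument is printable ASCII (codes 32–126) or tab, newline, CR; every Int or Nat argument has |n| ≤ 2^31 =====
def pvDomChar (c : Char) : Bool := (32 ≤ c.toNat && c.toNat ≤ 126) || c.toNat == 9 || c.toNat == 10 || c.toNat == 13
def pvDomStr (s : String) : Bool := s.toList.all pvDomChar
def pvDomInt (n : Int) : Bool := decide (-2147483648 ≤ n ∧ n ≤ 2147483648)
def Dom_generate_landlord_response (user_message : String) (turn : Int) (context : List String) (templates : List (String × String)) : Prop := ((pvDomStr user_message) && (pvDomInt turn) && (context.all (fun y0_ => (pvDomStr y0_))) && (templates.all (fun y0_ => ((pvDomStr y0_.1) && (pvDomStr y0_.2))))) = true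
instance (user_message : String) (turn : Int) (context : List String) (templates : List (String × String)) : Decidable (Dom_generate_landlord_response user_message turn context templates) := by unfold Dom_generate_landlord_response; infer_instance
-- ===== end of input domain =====

-- B replaces A's nested if/elif ladder with any()-keyword groups by one flat decision list of
-- (turn-guard, keyword-guard, response) rows scanned once, first match wins; objective: alternative.

-- ===== PORT A =====
def generate_landlord_response (user_message : String) (turn : Int) (context : List String) (templates : List (String × String)) : String :=
  let user_lower := PySem.Str.lower user_message
  if turn == 0 then
    if ["alquiler", "piso", "apartamento", "vivienda"].any (fun word => PySem.Str.isIn word user_lower) then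
      "Si, sigue disponible. Busca para entrar ya o mas adelante?"
    else
      "Si, digame. Que necesita saber sobre el inmueble?"
  else if turn == 1 then
    if ["precio", "euros", "mensual", "cuesta"].any (fun word => PySem.Str.isIn word user_lower) then
      "El precio es de 850 euros al mes, mas gastos de comunidad que son unos 50."
    else if ["cuando", "fecha", "entrar", "disponible"].any (fun word => PySem.Str.isIn word user_lower) then
      "Podria entrar a partir del dia 1 del mes que viene. Le interesa verlo?"
    else
      "Tiene dos habitaciones, salon, cocina equipada y un bano completo."
  else if turn == 2 then
    if ["negociar", "bajar", "descuento", "menos"].any (fun word => PySem.Str.isIn word user_lower) then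
      "Mire, el precio ya es ajustado para la zona. Aunque para un inquilino estable podria considerar algo."
    else if ["fianza", "deposito", "garantia"].any (fun word => PySem.Str.isIn word user_lower) then
      "La fianza son dos meses. Es lo habitual por la ley."
    else
      "Si quiere, podemos quedar para que lo vea. Le va bien manana por la tarde?"
  else if turn == 3 then
    if ["contrato", "duracion", "ano", "renovar"].any (fun word => PySem.Str.isIn word user_lower) then
      "El contrato es por un ano, renovable. Si se queda mas tiempo, mantenemos las condiciones."
    else if ["perfecto", "me interesa", "quedamos", "bien"].any (fun word => PySem.Str.isIn word user_lower) then
      "Estupendo. Le espero manana a las 6 entonces. Traiga el DNI por si acaso."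
    else
      "Podria dejarlo en 825 si firma por dos anos. Que le parece?"
  else
    "Muy bien, pues quedamos asi. Le mando la direccion exacta por mensaje. Hasta manana."

-- ===== PORT B =====
-- flat decision list: (turn-guard, keyword-guard, response); none = wildcard
def pvRules : List (Option Int × Option String × String) :=
  [ (some 0, some "alquiler",    "Si, sigue disponible. Busca para entrar ya o mas adelante?"),
    (some 0, some "piso",        "Si, sigue disponible. Busca para entrar ya o mas adelante?"),
    (some 0, some "apartamento", "Si, sigue disponible. Busca para entrar ya o mas adelante?"),
    (some 0, some "vivienda",    "Si, sigue disponible. Busca para entrar ya o mas adelante?"),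
    (some 0, none,               "Si, digame. Que necesita saber sobre el inmueble?"),
    (some 1, some "precio",      "El precio es de 850 euros al mes, mas gastos de comunidad que son unos 50."),
    (some 1, some "euros",       "El precio es de 850 euros al mes, mas gastos de comunidad que son unos 50."),
    (some 1, some "mensual",     "El precio es de 850 euros al mes, mas gastos de comunidad que son unos 50."),
    (some 1, some "cuesta",      "El precio es de 850 euros al mes, mas gastos de comunidad que son unos 50."),
    (some 1, some "cuando",      "Podria entrar a partir del dia 1 del mes que viene. Le interesa verlo?"),
    (some 1, some "fecha",       "Podria entrar a partir del dia 1 del mes que viene. Le interesa verlo?"),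
    (some 1, some "entrar",      "Podria entrar a partir del dia 1 del mes que viene. Le interesa verlo?"),
    (some 1, some "disponible",  "Podria entrar a partir del dia 1 del mes que viene. Le interesa verlo?"),
    (some 1, none,               "Tiene dos habitaciones, salon, cocina equipada y un bano completo."),
    (some 2, some "negociar",    "Mire, el precio ya es ajustado para la zona. Aunque para un inquilino estable podria considerar algo."),
    (some 2, some "bajar",       "Mire, el precio ya es ajustado para la zona. Aunque para un inquilino estable podria considerar algo."),
    (some 2, some "descuento",   "Mire, el precio ya es ajustado para la zona. Aunque para un inquilino estable podria considerar algo."),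
    (some 2, some "menos",       "Mire, el precio ya es ajustado para la zona. Aunque para un inquilino estable podria considerar algo."),
    (some 2, some "fianza",      "La fianza son dos meses. Es lo habitual por la ley."),
    (some 2, some "deposito",    "La fianza son dos meses. Es lo habitual por la ley."),
    (some 2, some "garantia",    "La fianza son dos meses. Es lo habitual por la ley."),
    (some 2, none,               "Si quiere, podemos quedar para que lo vea. Le va bien manana por la tarde?"),
    (some 3, some "contrato",    "El contrato es por un ano, renovable. Si se queda mas tiempo, mantenemos las condiciones."),
    (some 3, some "duracion",    "El contrato es por un ano, renovable. Si se queda mas tiempo, mantenemos las condiciones."),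
    (some 3, some "ano",         "El contrato es por un ano, renovable. Si se queda mas tiempo, mantenemos las condiciones."),
    (some 3, some "renovar",     "El contrato es por un ano, renovable. Si se queda mas tiempo, mantenemos las condiciones."),
    (some 3, some "perfecto",    "Estupendo. Le espero manana a las 6 entonces. Traiga el DNI por si acaso."),
    (some 3, some "me interesa", "Estupendo. Le espero manana a las 6 entonces. Traiga el DNI por si acaso."),
    (some 3, some "quedamos",    "Estupendo. Le espero manana a las 6 entonces. Traiga el DNI por si acaso."),
    (some 3, some "bien",        "Estupendo. Le espero manana a las 6 entonces. Traiga el DNI por si acaso."),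
    (some 3, none,               "Podria dejarlo en 825 si firma por dos anos. Que le parece?"),
    (none,   none,               "Muy bien, pues quedamos asi. Le mando la direccion exacta por mensaje. Hasta manana.") ]

-- the for-loop over the rule rows: first row whose guards both hold wins; the Python loop can
-- only fall off the end if the list had no catch-all, so the [] case ("" here) is unreachable
def pvScan (turn : Int) (user_lower : String) : List (Option Int × Option String × String) → String
  | [] => ""
  | (t, kw, resp) :: rest =>
    if (t.elim true (fun k => k == turn)) && (kw.elim true (fun w => PySem.Str.isIn w user_lower)) then
      resp
    else pvScan turn user_lower rest

def generate_landlord_response_alt (user_message : String) (turn : Int) (context : List String) (templates : List (String × String)) : String :=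
  let user_lower := PySem.Str.lower user_message
  pvScan turn user_lower pvRules

-- ===== PRECONDITION & SPEC =====
def Spec_generate_landlord_response (user_message : String) (turn : Int) (context : List String) (templates : List (String × String)) (out : String) : Prop := out = generate_landlord_response_alt user_message turn context templates
instance (user_message : String) (turn : Int) (context : List String) (templates : List (String × String)) (out : String) : Decidable (Spec_generate_landlord_response user_message turn context templates out) := by unfold Spec_generate_landlord_response; infer_instance

-- ===== CLAIM (what is proved, stated in full; the proofs are below) =====
def Claim_equal_generate_landlord_response : Prop := ∀ (user_message : String) (turn : Int) (context : List String) (templates : List (String × String)), Dom_generate_landlord_response user_message turn context templates → Spec_generate_landlord_response user_message turn context templates (generate_landlord_response user_message turn context templates)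

-- ===== LEMMAS AND PROOFS =====
theorem pv_if_or_flatten {A : Type} (a b : Prop) [Decidable a] [Decidable b] (r x : A) :
    (if a ∨ b then r else x) = (if a then r else if b then r else x) := by
  by_cases ha : a <;> simp [ha]

-- ===== VERDICT (by name: the statement is the Claim_ definition above) =====
theorem generate_landlord_response_spec : Claim_equal_generate_landlord_response := by
  intro um turn ctx tmpl _
  unfold Spec_generate_landlord_response generate_landlord_response generate_landlord_response_alt pvRules
  by_cases h0 : turn = 0
  · subst h0; simp [pvScan, pv_if_or_flatten]
  by_cases h1 : turn = 1
  · subst h1; simp [pvScan, pv_if_or_flatten]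
  by_cases h2 : turn = 2
  · subst h2; simp [pvScan, pv_if_or_flatten]
  by_cases h3 : turn = 3
  · subst h3; simp [pvScan, pv_if_or_flatten]
  simp [pvScan, h0, h1, h2, h3, Ne.symm h0, Ne.symm h1, Ne.symm h2, Ne.symm h3]
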